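-- pv_equiv track=rewrite | github.com/ChenyuL/RWE_LLM_validator | run_li_paper_analysis_improved.py | outputs_agree
-- ===== SOURCE A (Python) =====
-- def outputs_agree(output1, output2):
--     # Simple string comparison for now
--     # Could be enhanced with semantic similarity or other NLP techniques
--     if not output1 or not output2:
--         return False
--
--     # Check for exact match
--     if output1.lower() == output2.lower():
--         return True
--
--     # Check for 'unknown' or similar values
--     unknown_patterns = ['unknown', 'not enough information', 'cannot determine', 'unclear']
--     if any(pattern in output1.lower() for pattern in unknown_patterns) and \
--        any(pattern in output2.lower() for pattern in unknown_patterns):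
--         return True
--
--     # Check for yes/no agreement
--     yes_patterns = ['yes', 'complies', 'compliant', 'fulfilled', 'reported']
--     no_patterns = ['no', 'does not comply', 'non-compliant', 'not fulfilled', 'not reported']
--
--     output1_yes = any(pattern in output1.lower() for pattern in yes_patterns)
--     output1_no = any(pattern in output1.lower() for pattern in no_patterns)
--     output2_yes = any(pattern in output2.lower() for pattern in yes_patterns)
--     output2_no = any(pattern in output2.lower() for pattern in no_patterns)
--
--     if (output1_yes and output2_yes) or (output1_no and output2_no):
--         return True
--
--     return False
-- ===== SOURCE B (Python) =====
-- # B: one position-major scan per string over a single (pattern, bit) table,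
-- # accumulating a label bitmask; agreement = nonzero AND of the two masks.
--
-- _TABLE = (
--     [(p, 1) for p in ['unknown', 'not enough information', 'cannot determine', 'unclear']]
--     + [(p, 2) for p in ['yes', 'complies', 'compliant', 'fulfilled', 'reported']]
--     + [(p, 4) for p in ['no', 'does not comply', 'non-compliant', 'not fulfilled', 'not reported']]
-- )
--
--
-- def _labels(s):
--     """Bitmask of semantic labels (1=unknown, 2=yes, 4=no) found anywhere in s.lower()."""
--     t = s.lower()
--     found = 0
--     for i in range(len(t)):
--         for pat, bit in _TABLE:
--             if t.startswith(pat, i):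
--                 found |= bit
--     return found
--
--
-- def outputs_agree(output1, output2):
--     if not output1 or not output2:
--         return False
--     if output1.lower() == output2.lower():
--         return True
--     return (_labels(output1) & _labels(output2)) != 0
-- ===== Notes on version B (the rewrite author's own statement) =====
-- stated objective: alternative
-- what changed: Replaces A's pattern-major cascade (one 'in' scan per pattern per string, combined by paired boolean tests) with a single position-major scan per string over a merged (pattern,bit) table that accumulates a label bitmask via startswith at each index; agreement is a nonzero bitwise AND of the two masks.
import Mathlib
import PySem

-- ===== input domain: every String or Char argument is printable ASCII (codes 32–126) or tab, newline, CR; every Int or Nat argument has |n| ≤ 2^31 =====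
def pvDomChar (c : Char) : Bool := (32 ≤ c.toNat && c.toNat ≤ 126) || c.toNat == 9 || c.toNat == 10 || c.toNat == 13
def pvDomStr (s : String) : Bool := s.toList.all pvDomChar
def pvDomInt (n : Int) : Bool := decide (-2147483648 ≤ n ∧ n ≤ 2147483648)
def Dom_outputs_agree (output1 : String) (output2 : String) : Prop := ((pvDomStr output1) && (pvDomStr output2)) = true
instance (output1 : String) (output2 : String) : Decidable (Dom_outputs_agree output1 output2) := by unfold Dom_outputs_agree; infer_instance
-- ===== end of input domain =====

-- B replaces A's pattern-major cascade of 'in' tests with one position-major scan per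
-- string over a merged (pattern,bit) table accumulating a label bitmask; objective: alternative.


-- ===== PORT A =====
def pvUnknownPatterns : List String := ["unknown", "not enough information", "cannot determine", "unclear"]
def pvYesPatterns : List String := ["yes", "complies", "compliant", "fulfilled", "reported"]
def pvNoPatterns : List String := ["no", "does not comply", "non-compliant", "not fulfilled", "not reported"]

def outputs_agree (output1 : String) (output2 : String) : Bool :=
  if output1 = "" ∨ output2 = "" then false
  else if PySem.Str.lower output1 = PySem.Str.lower output2 then true
  else if (pvUnknownPatterns.any fun p => PySem.Str.isIn p (PySem.Str.lower output1)) &&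
          (pvUnknownPatterns.any fun p => PySem.Str.isIn p (PySem.Str.lower output2)) then true
  else
    let output1_yes := pvYesPatterns.any fun p => PySem.Str.isIn p (PySem.Str.lower output1)
    let output1_no := pvNoPatterns.any fun p => PySem.Str.isIn p (PySem.Str.lower output1)
    let output2_yes := pvYesPatterns.any fun p => PySem.Str.isIn p (PySem.Str.lower output2)
    let output2_no := pvNoPatterns.any fun p => PySem.Str.isIn p (PySem.Str.lower output2)
    if (output1_yes && output2_yes) || (output1_no && output2_no) then true
    else false

-- ===== PORT B =====
-- merged (pattern, bit) table, _TABLE of Source B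
def pvLabelTable : List (String × Nat) :=
  [("unknown", 1), ("not enough information", 1), ("cannot determine", 1), ("unclear", 1),
   ("yes", 2), ("complies", 2), ("compliant", 2), ("fulfilled", 2), ("reported", 2),
   ("no", 4), ("does not comply", 4), ("non-compliant", 4), ("not fulfilled", 4), ("not reported", 4)]

-- _labels of Source B; Python's t.startswith(pat, i) with 0 ≤ i is exactly
-- PySem.Chars.startswith on (t.drop i), so the hand port below is exact.
def pvLabels (s : String) : Nat :=
  let t := (PySem.Str.lower s).toList
  (List.range t.length).foldl
    (fun found i =>
      pvLabelTable.foldl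
        (fun found pb =>
          if PySem.Chars.startswith (t.drop i) pb.1.toList then found ||| pb.2 else found)
        found)
    0

def outputs_agree_alt (output1 : String) (output2 : String) : Bool :=
  if output1 = "" ∨ output2 = "" then false
  else if PySem.Str.lower output1 = PySem.Str.lower output2 then true
  else decide (pvLabels output1 &&& pvLabels output2 ≠ 0)

-- ===== PRECONDITION & SPEC =====
def Spec_outputs_agree (output1 : String) (output2 : String) (out : Bool) : Prop := out = outputs_agree_alt output1 output2
instance (output1 : String) (output2 : String) (out : Bool) : Decidable (Spec_outputs_agree output1 output2 out) := by unfold Spec_outputs_agree; infer_instance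

-- ===== CLAIM (what is proved, stated in full; the proofs are below) =====
def Claim_equal_outputs_agree : Prop := ∀ (output1 : String) (output2 : String), Dom_outputs_agree output1 output2 → Spec_outputs_agree output1 output2 (outputs_agree output1 output2)

-- ===== LEMMAS AND PROOFS =====

-- the 'any pattern in s' booleans A computes per category
def pvHasCat (pats : List String) (s : String) : Bool :=
  pats.any fun p => PySem.Str.isIn p (PySem.Str.lower s)

-- one step of bit b through a fold that conditionally ORs in bits
theorem foldl_or_if_testBit {α : Type} (l : List α) (c : α → Bool) (g : α → Nat)
    (a : Nat) (b : Nat) :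
    ((l.foldl (fun f x => if c x then f ||| g x else f) a).testBit b)
      = (a.testBit b || l.any fun x => c x && (g x).testBit b) := by
  induction l generalizing a with
  | nil => simp
  | cons x xs ih =>
      simp only [List.foldl_cons, List.any_cons]
      by_cases hc : c x = true
      · simp [hc, ih, Nat.testBit_or, Bool.or_assoc]
      · simp at hc
        simp [hc, ih]

-- bit b of the whole double fold of pvLabels
theorem pvLabels_testBit_fold (t : List Char) (positions : List Nat) (a b : Nat) :
    ((positions.foldl
        (fun found i =>
          pvLabelTable.foldl
            (fun found pb =>
              if PySem.Chars.startswith (t.drop i) pb.1.toList then found ||| pb.2 else found)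
            found)
        a).testBit b)
      = (a.testBit b ||
         positions.any fun i => pvLabelTable.any fun pb =>
           PySem.Chars.startswith (t.drop i) pb.1.toList && pb.2.testBit b) := by
  induction positions generalizing a with
  | nil => simp
  | cons i is ih =>
      simp only [List.foldl_cons, List.any_cons, ih, foldl_or_if_testBit, Bool.or_assoc]

theorem any_orB {α : Type} (l : List α) (f g : α → Bool) :
    (l.any fun x => f x || g x) = (l.any f || l.any g) := by
  induction l with
  | nil => simp
  | cons x xs ih => simp [ih]; cases f x <;> cases g x <;> simp [Bool.or_comm, Bool.or_left_comm]

-- scanning every start position finds a nonempty pattern iff it is a substring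
theorem any_startswith_range (t : List Char) (sub : List Char) (hs : sub ≠ []) :
    ((List.range t.length).any fun i => PySem.Chars.startswith (t.drop i) sub)
      = PySem.Chars.isIn sub t := by
  rw [Bool.eq_iff_iff, List.any_eq_true, ← PySem.Chars.exists_prefix_drop_iff_isIn]
  constructor
  · rintro ⟨i, _, h⟩
    exact ⟨i, (PySem.Chars.startswith_iff _ _).1 h⟩
  · rintro ⟨j, hj⟩
    have hjlt : j < t.length := by
      by_contra hge
      have : t.drop j = [] := List.drop_eq_nil_of_le (by omega)
      rw [this, List.prefix_nil] at hj
      exact hs hj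
    exact ⟨j, List.mem_range.2 hjlt, (PySem.Chars.startswith_iff _ _).2 hj⟩

-- bit k of pvLabels is exactly "some pattern of that category occurs"
theorem pvLabels_testBit_cat (s : String) :
    (pvLabels s).testBit 0 = pvHasCat pvUnknownPatterns s ∧
    (pvLabels s).testBit 1 = pvHasCat pvYesPatterns s ∧
    (pvLabels s).testBit 2 = pvHasCat pvNoPatterns s := by
  have key : ∀ k : Nat, (pvLabels s).testBit k
      = ((List.range (PySem.Str.lower s).toList.length).any fun i =>
          pvLabelTable.any fun pb =>
            PySem.Chars.startswith ((PySem.Str.lower s).toList.drop i) pb.1.toList &&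
              pb.2.testBit k) := by
    intro k
    unfold pvLabels
    rw [pvLabels_testBit_fold]
    simp
  have bridge : ∀ (pats : List String),
      (pats.any fun p => PySem.Chars.isIn p.toList (PySem.Str.lower s).toList)
        = pvHasCat pats s := by
    intro pats
    simp [pvHasCat]
  refine ⟨?_, ?_, ?_⟩
  · rw [key]
    simp only [pvLabelTable, List.any_cons, List.any_nil,
      show Nat.testBit 1 0 = true from by decide, show Nat.testBit 2 0 = false from by decide,
      show Nat.testBit 4 0 = false from by decide,
      Bool.and_true, Bool.and_false, Bool.or_false]
    rw [← bridge]
    simp only [any_orB]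
    rw [any_startswith_range _ "unknown".toList (by decide),
        any_startswith_range _ "not enough information".toList (by decide),
        any_startswith_range _ "cannot determine".toList (by decide),
        any_startswith_range _ "unclear".toList (by decide)]
    simp [pvUnknownPatterns, List.any_cons, List.any_nil]
  · rw [key]
    simp only [pvLabelTable, List.any_cons, List.any_nil,
      show Nat.testBit 1 1 = false from by decide, show Nat.testBit 2 1 = true from by decide,
      show Nat.testBit 4 1 = false from by decide,
      Bool.and_true, Bool.and_false, Bool.or_false]
    rw [← bridge]
    simp only [any_orB]
    rw [any_startswith_range _ "yes".toList (by decide),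
        any_startswith_range _ "complies".toList (by decide),
        any_startswith_range _ "compliant".toList (by decide),
        any_startswith_range _ "fulfilled".toList (by decide),
        any_startswith_range _ "reported".toList (by decide)]
    simp [pvYesPatterns, List.any_cons, List.any_nil]
  · rw [key]
    simp only [pvLabelTable, List.any_cons, List.any_nil,
      show Nat.testBit 1 2 = false from by decide, show Nat.testBit 2 2 = false from by decide,
      show Nat.testBit 4 2 = true from by decide,
      Bool.and_true, Bool.and_false, Bool.or_false]
    rw [← bridge]
    simp only [any_orB]
    rw [any_startswith_range _ "no".toList (by decide),
        any_startswith_range _ "does not comply".toList (by decide),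
        any_startswith_range _ "non-compliant".toList (by decide),
        any_startswith_range _ "not fulfilled".toList (by decide),
        any_startswith_range _ "not reported".toList (by decide)]
    simp [pvNoPatterns, List.any_cons, List.any_nil]

-- pvLabels is a 3-bit mask
theorem pvLabels_lt_8 (s : String) : pvLabels s < 8 := by
  unfold pvLabels
  simp only []
  generalize (PySem.Str.lower s).toList = t
  have h : ∀ (positions : List Nat) (a : Nat), a < 8 →
      (positions.foldl
        (fun found i =>
          pvLabelTable.foldl
            (fun found pb =>
              if PySem.Chars.startswith (t.drop i) pb.1.toList then found ||| pb.2 else found)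
            found)
        a) < 8 := by
    intro positions
    induction positions with
    | nil => intro a ha; simpa using ha
    | cons i is ih =>
        intro a ha
        refine ih _ ?_
        have h2 : ∀ (l : List (String × Nat)) (a : Nat),
            (∀ pb ∈ l, pb.2 < 8) → a < 8 →
            (l.foldl (fun found pb =>
              if PySem.Chars.startswith (t.drop i) pb.1.toList then found ||| pb.2 else found) a) < 8 := by
          intro l
          induction l with
          | nil => intro a _ ha; simpa using ha
          | cons pb ps ihl =>
              intro a hmem ha
              refine ihl _ (fun q hq => hmem q (List.mem_cons_of_mem _ hq)) ?_
              dsimp only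
              split
              · have hb : pb.2 < 8 := hmem pb (List.mem_cons_self)
                have := Nat.or_lt_two_pow (n := 3) (by simpa using ha) (by simpa using hb)
                simpa using this
              · exact ha
        refine h2 _ _ ?_ ha
        intro pb hpb
        fin_cases hpb <;> decide
  exact h _ 0 (by decide)

-- nonzero AND of two 3-bit masks = some common bit among 0,1,2
theorem and_ne_zero_iff_bits (m n : Nat) (hm : m < 8) (hn : n < 8) :
    decide (m &&& n ≠ 0)
      = ((m.testBit 0 && n.testBit 0) || (m.testBit 1 && n.testBit 1) ||
         (m.testBit 2 && n.testBit 2)) := by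
  interval_cases m <;> interval_cases n <;> decide

-- ===== VERDICT (by name: the statement is the Claim_ definition above) =====
theorem outputs_agree_spec : Claim_equal_outputs_agree := by
  intro o1 o2 _
  unfold Spec_outputs_agree outputs_agree outputs_agree_alt
  by_cases h1 : o1 = "" ∨ o2 = ""
  · simp [h1]
  · simp only [h1, if_false]
    by_cases h2 : PySem.Str.lower o1 = PySem.Str.lower o2
    · simp [h2]
    · simp only [h2, if_false]
      rw [and_ne_zero_iff_bits _ _ (pvLabels_lt_8 o1) (pvLabels_lt_8 o2)]
      obtain ⟨hu1, hy1, hn1⟩ := pvLabels_testBit_cat o1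
      obtain ⟨hu2, hy2, hn2⟩ := pvLabels_testBit_cat o2
      rw [hu1, hy1, hn1, hu2, hy2, hn2]
      show _ = (pvHasCat pvUnknownPatterns o1 && pvHasCat pvUnknownPatterns o2 || _ || _)
      unfold pvHasCat
      generalize (pvUnknownPatterns.any fun p => PySem.Str.isIn p (PySem.Str.lower o1)) = u1
      generalize (pvUnknownPatterns.any fun p => PySem.Str.isIn p (PySem.Str.lower o2)) = u2
      generalize (pvYesPatterns.any fun p => PySem.Str.isIn p (PySem.Str.lower o1)) = y1
      generalize (pvYesPatterns.any fun p => PySem.Str.isIn p (PySem.Str.lower o2)) = y2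
      generalize (pvNoPatterns.any fun p => PySem.Str.isIn p (PySem.Str.lower o1)) = n1
      generalize (pvNoPatterns.any fun p => PySem.Str.isIn p (PySem.Str.lower o2)) = n2
      cases u1 <;> cases u2 <;> cases y1 <;> cases y2 <;> cases n1 <;> cases n2 <;> decide
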